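-- pv_equiv track=rewrite | github.com/Khen-A/Student_Attendance_Management_System | Student_Attendance.py | max_schedule_day
-- ===== SOURCE A (Python) =====
-- def max_schedule_day(__schedule):
--     max_count = 0
--     if __schedule:
--         day_counts = {}  # Dictionary to store counts of schedules for each day
--
--         for entry in __schedule:
--             day = entry[2]  # Get the day from the entry
--             if day in day_counts:
--                 day_counts[day] += 1  # Increment the count for that day
--             else:
--                 day_counts[day] = 1  # Initialize the count for that day
--
--         # Find the day with the maximum count of schedules
--         max_day = max(day_counts, key=day_counts.get)
--         max_count = day_counts[max_day]
--     return max_count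
-- ===== SOURCE B (Python) =====
-- def max_schedule_day(__schedule):
--     days = sorted(entry[2] for entry in __schedule)
--     best = 0
--     run = 0
--     prev = None
--     for d in days:
--         run = run + 1 if prev == d else 1
--         best = max(best, run)
--         prev = d
--     return best
-- ===== Notes on version B (the rewrite author's own statement) =====
-- stated objective: alternative
-- what changed: Replaces the dict-counting plus argmax-over-keys with a sort-then-scan: B sorts the day values and makes one linear pass maintaining the current run length and its running maximum.
import Mathlib
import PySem

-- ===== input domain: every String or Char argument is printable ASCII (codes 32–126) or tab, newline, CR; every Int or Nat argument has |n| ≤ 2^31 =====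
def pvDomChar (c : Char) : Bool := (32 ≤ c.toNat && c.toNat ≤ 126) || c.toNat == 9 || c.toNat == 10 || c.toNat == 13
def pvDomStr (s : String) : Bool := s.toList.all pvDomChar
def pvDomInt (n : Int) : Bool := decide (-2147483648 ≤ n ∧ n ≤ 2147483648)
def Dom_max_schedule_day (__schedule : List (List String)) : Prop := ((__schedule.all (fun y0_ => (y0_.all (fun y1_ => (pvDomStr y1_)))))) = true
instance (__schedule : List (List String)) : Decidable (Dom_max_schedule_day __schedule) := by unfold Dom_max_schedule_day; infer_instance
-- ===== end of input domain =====

-- B changes the algorithm (sort the days, then scan runs) — alternative structure, not claimed faster.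
-- ===== PORT A =====
def max_schedule_day (__schedule : List (List String)) : Int :=
  -- max_count = 0; if __schedule: build day_counts, take argmax key, return its count
  if __schedule ≠ [] then
    let day_counts : PySem.Dict String Int :=
      __schedule.foldl (fun d entry =>
        let day := PySem.List.pyGetD entry 2 ""   -- entry[2]; Pre_ guarantees the index is in range
        if d.contains day then d.insert day (d.getD day 0 + 1)
        else d.insert day 1) PySem.Dict.empty
    -- max_day = max(day_counts, key=day_counts.get); max_count = day_counts[max_day]
    match PySem.List.max? day_counts.keys (fun k => day_counts.getD k 0) with
    | some max_day => day_counts.getD max_day 0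
    | none => 0      -- unreachable: the dict is nonempty here
  else 0

-- ===== PORT B =====
-- one step of B's scan: state = (best, run, prev)
def pvScanStep (s : Int × Int × Option String) (d : String) : Int × Int × Option String :=
  let run := if s.2.2 == some d then s.2.1 + 1 else 1
  (max s.1 run, run, some d)

def max_schedule_day_alt (__schedule : List (List String)) : Int :=
  let days := PySem.List.sorted (__schedule.map (fun entry => PySem.List.pyGetD entry 2 "")) (fun d => d) false
  (days.foldl pvScanStep ((0 : Int), (0 : Int), (none : Option String))).1

-- ===== PRECONDITION & SPEC =====
-- Pre_ excludes exactly the inputs where Python A raises IndexError on entry[2] (an entry with fewer than 3 fields).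
def Pre_max_schedule_day (__schedule : List (List String)) : Prop :=
  ∀ e ∈ __schedule, 3 ≤ e.length
instance (__schedule : List (List String)) : Decidable (Pre_max_schedule_day __schedule) := by unfold Pre_max_schedule_day; infer_instance
def pvWitness_max_schedule_day : List (List String) := [["Ann", "Math", "Mon"], ["Bob", "Art", "Mon"], ["Cy", "Gym", "Tue"]]
def Spec_max_schedule_day (__schedule : List (List String)) (out : Int) : Prop := out = max_schedule_day_alt __schedule
instance (__schedule : List (List String)) (out : Int) : Decidable (Spec_max_schedule_day __schedule out) := by unfold Spec_max_schedule_day; infer_instance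

-- ===== CLAIM (what is proved, stated in full; the proofs are below) =====
def Claim_equal_max_schedule_day : Prop := ∀ (__schedule : List (List String)), Dom_max_schedule_day __schedule → Pre_max_schedule_day __schedule → Spec_max_schedule_day __schedule (max_schedule_day __schedule)

-- ===== LEMMAS AND PROOFS =====
lemma pvScan_bound (l : List String) (p : String) (best run : Int)
    (hs : l.Pairwise (· ≤ ·)) (hp : ∀ x ∈ l, p ≤ x) (hr0 : 0 ≤ run) (hrb : run ≤ best) :
    best ≤ (l.foldl pvScanStep (best, run, some p)).1 ∧
    run + l.count p ≤ (l.foldl pvScanStep (best, run, some p)).1 ∧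
    ∀ v ∈ l, (l.count v : Int) ≤ (l.foldl pvScanStep (best, run, some p)).1 := by
  induction l generalizing p best run with
  | nil => simp; omega
  | cons d t ih =>
    rcases List.pairwise_cons.mp hs with ⟨hd, ht⟩
    have hpd : p ≤ d := hp d (by simp)
    by_cases h : p = d
    · subst h
      have step : pvScanStep (best, run, some p) p = (max best (run+1), run+1, some p) := by
        simp [pvScanStep]
      rw [List.foldl_cons, step]
      obtain ⟨ib, ir, iv⟩ := ih p (max best (run+1)) (run+1) ht hd (by omega) (by omega)
      refine ⟨by omega, ?_, ?_⟩
      · simp only [List.count_cons_self]; push_cast; omega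
      · intro v hv
        rcases List.mem_cons.mp hv with rfl | hv
        · simp only [List.count_cons_self]; push_cast; omega
        · by_cases hvd : v = p
          · subst hvd; simp only [List.count_cons_self]; push_cast; omega
          · have := iv v hv
            have hvd' : ¬ p = v := fun hh => hvd hh.symm
            simp only [List.count_cons, beq_iff_eq, hvd', if_false]
            omega
    · have step : pvScanStep (best, run, some p) d = (max best 1, 1, some d) := by
        simp [pvScanStep, h]
      rw [List.foldl_cons, step]
      obtain ⟨ib, ir, iv⟩ := ih d (max best 1) 1 ht hd (by omega) (by omega)
      have hpt : p ∉ t := by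
        intro hm
        exact h (le_antisymm hpd (hd p hm))
      have hcp : List.count p (d :: t) = 0 := by
        have h' : ¬ d = p := fun hh => h hh.symm
        simp [h', List.count_eq_zero.mpr hpt]
      refine ⟨by omega, by rw [hcp]; push_cast; omega, ?_⟩
      · intro v hv
        rcases List.mem_cons.mp hv with rfl | hv
        · simp only [List.count_cons_self]; push_cast; omega
        · by_cases hvd : v = d
          · subst hvd; simp only [List.count_cons_self]; push_cast; omega
          · have := iv v hv
            have hvd' : ¬ d = v := fun hh => hvd hh.symm
            simp only [List.count_cons, beq_iff_eq, hvd', if_false]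
            omega

lemma pvScan_mem (l : List String) (p : String) (best run : Int)
    (hs : l.Pairwise (· ≤ ·)) (hp : ∀ x ∈ l, p ≤ x) (hr0 : 0 ≤ run) (hrb : run ≤ best) :
    (l.foldl pvScanStep (best, run, some p)).1 = best ∨
    (l.foldl pvScanStep (best, run, some p)).1 = run + l.count p ∨
    ∃ m ∈ l, (l.foldl pvScanStep (best, run, some p)).1 = (l.count m : Int) := by
  induction l generalizing p best run with
  | nil => simp
  | cons d t ih =>
    rcases List.pairwise_cons.mp hs with ⟨hd, ht⟩
    have hpd : p ≤ d := hp d (by simp)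
    by_cases h : p = d
    · subst h
      have step : pvScanStep (best, run, some p) p = (max best (run+1), run+1, some p) := by
        simp [pvScanStep]
      rw [List.foldl_cons, step]
      obtain ⟨ib, ir, iv⟩ := pvScan_bound t p (max best (run+1)) (run+1) ht hd (by omega) (by omega)
      rcases ih p (max best (run+1)) (run+1) ht hd (by omega) (by omega) with h1 | h2 | ⟨m, hm, h3⟩
      · by_cases hb : run + 1 ≤ best
        · left; omega
        · -- r = run+1; by ir, t.count p = 0
          right; left
          have : (t.count p : Int) = 0 := by omega
          simp only [List.count_cons_self]; push_cast; omega
      · right; left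
        simp only [List.count_cons_self]; push_cast; omega
      · by_cases hmp : m = p
        · subst hmp; exfalso; omega
        · right; right
          refine ⟨m, by simp [hm], ?_⟩
          have hmp' : ¬ p = m := fun hh => hmp hh.symm
          simp only [List.count_cons, beq_iff_eq, hmp', if_false]
          omega
    · have step : pvScanStep (best, run, some p) d = (max best 1, 1, some d) := by
        simp [pvScanStep, h]
      rw [List.foldl_cons, step]
      obtain ⟨ib, ir, iv⟩ := pvScan_bound t d (max best 1) 1 ht hd (by omega) (by omega)
      rcases ih d (max best 1) 1 ht hd (by omega) (by omega) with h1 | h2 | ⟨m, hm, h3⟩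
      · by_cases hb : 1 ≤ best
        · left; omega
        · right; right
          refine ⟨d, by simp, ?_⟩
          have : (t.count d : Int) = 0 := by omega
          simp only [List.count_cons_self]; push_cast; omega
      · right; right
        refine ⟨d, by simp, ?_⟩
        simp only [List.count_cons_self]; push_cast; omega
      · by_cases hmd : m = d
        · subst hmd; exfalso; omega
        · right; right
          refine ⟨m, by simp [hm], ?_⟩
          have hmd' : ¬ d = m := fun hh => hmd hh.symm
          simp only [List.count_cons, beq_iff_eq, hmd', if_false]
          omega

lemma pvScan_spec (ds : List String) (hne : ds ≠ []) :
    ∃ m ∈ ds, (PySem.List.sorted ds (fun d => d) false |>.foldl pvScanStep ((0:Int),(0:Int),none)).1 = (ds.count m : Int) ∧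
      ∀ v ∈ ds, (ds.count v : Int) ≤ (PySem.List.sorted ds (fun d => d) false |>.foldl pvScanStep ((0:Int),(0:Int),none)).1 := by
  rcases hss : PySem.List.sorted ds (fun d => d) false with _ | ⟨d0, t⟩
  · exact absurd ((PySem.List.sorted_eq_nil_iff ds (fun d => d) false).mp hss) hne
  · have hperm : (d0 :: t).Perm ds := hss ▸ PySem.List.sorted_perm ds (fun d => d) false
    have hpair : (d0 :: t).Pairwise (· ≤ ·) := hss ▸ PySem.List.sorted_pairwise ds (fun d => d)
    rcases List.pairwise_cons.mp hpair with ⟨hd, ht⟩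
    have step : pvScanStep ((0:Int), (0:Int), (none : Option String)) d0 = (1, 1, some d0) := by
      simp [pvScanStep]
    rw [List.foldl_cons, step]
    obtain ⟨ib, ir, iv⟩ := pvScan_bound t d0 1 1 ht hd (by omega) (by omega)
    have hc : ∀ v, ds.count v = (d0 :: t).count v := fun v => (hperm.count_eq v).symm
    have hbound : ∀ v ∈ ds, (ds.count v : Int) ≤ (t.foldl pvScanStep (1, 1, some d0)).1 := by
      intro v hv
      have hv' : v ∈ d0 :: t := hperm.mem_iff.mpr hv
      rw [hc v]
      rcases List.mem_cons.mp hv' with rfl | hvt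
      · simp only [List.count_cons_self]; push_cast; omega
      · by_cases hvd : v = d0
        · subst hvd; simp only [List.count_cons_self]; push_cast; omega
        · have := iv v hvt
          have hvd' : ¬ d0 = v := fun hh => hvd hh.symm
          simp only [List.count_cons, beq_iff_eq, hvd', if_false]
          omega
    have hmem : ∃ m ∈ ds, (t.foldl pvScanStep (1, 1, some d0)).1 = (ds.count m : Int) := by
      rcases pvScan_mem t d0 1 1 ht hd (by omega) (by omega) with h1 | h2 | ⟨m, hm, h3⟩
      · refine ⟨d0, hperm.mem_iff.mp (by simp), ?_⟩
        rw [hc d0]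
        have : (t.count d0 : Int) = 0 := by omega
        simp only [List.count_cons_self]; push_cast; omega
      · refine ⟨d0, hperm.mem_iff.mp (by simp), ?_⟩
        rw [hc d0]
        simp only [List.count_cons_self]; push_cast; omega
      · by_cases hmd : m = d0
        · subst hmd; exfalso; omega
        · refine ⟨m, hperm.mem_iff.mp (by simp [hm]), ?_⟩
          rw [hc m]
          have hmd' : ¬ d0 = m := fun hh => hmd hh.symm
          simp only [List.count_cons, beq_iff_eq, hmd', if_false]
          omega
    obtain ⟨m, hm, hmv⟩ := hmem
    exact ⟨m, hm, hmv, hbound⟩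

lemma pvA_counter (xs : List (List String)) :
    xs.foldl (fun d entry =>
        let day := PySem.List.pyGetD entry 2 ""
        if d.contains day then d.insert day (d.getD day 0 + 1)
        else d.insert day 1) PySem.Dict.empty
      = PySem.Dict.counter (xs.map (fun entry => PySem.List.pyGetD entry 2 "")) := by
  rw [← PySem.Dict.foldl_insert_getD_add_one_eq_counter, List.foldl_map]
  apply PySem.List.foldl_congr_mem
  intro d x _
  by_cases h : d.contains (PySem.List.pyGetD x 2 "") = true
  · simp [h]
  · simp only [Bool.not_eq_true] at h
    simp [h, PySem.Dict.getD_of_not_contains d 0 h]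

-- ===== VERDICT (by name: the statement is the Claim_ definition above) =====
theorem max_schedule_day_spec : Claim_equal_max_schedule_day := by
  intro xs _ _
  unfold Spec_max_schedule_day max_schedule_day max_schedule_day_alt
  by_cases hne : xs = []
  · subst hne; rfl
  · rw [if_pos hne]
    simp only []
    rw [pvA_counter]
    set ds := xs.map (fun entry => PySem.List.pyGetD entry 2 "") with hds
    have hdsne : ds ≠ [] := by simp [hds, hne]
    obtain ⟨mB, hmB, hBv, hBall⟩ := pvScan_spec ds hdsne
    have hkeys : (PySem.Dict.counter ds).keys = PySem.Set.ofList ds := PySem.Dict.keys_counter ds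
    obtain ⟨d0, t, hcons⟩ := List.exists_cons_of_ne_nil hdsne
    have hne' : PySem.List.max? (PySem.Dict.counter ds).keys (fun k => (PySem.Dict.counter ds).getD k 0) ≠ none := by
      intro hnil
      have := (PySem.List.max?_eq_none_iff _ _).mp hnil
      rw [hkeys] at this
      have : d0 ∈ (PySem.Set.ofList ds : List String) := by
        rw [PySem.Set.mem_ofList]; simp [hcons]
      simp_all
    obtain ⟨mA, hmA⟩ := Option.ne_none_iff_exists'.mp hne'
    rw [hmA]
    simp only []
    have hmAmem : mA ∈ ds := by
      have := PySem.List.max?_mem hmA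
      rwa [hkeys, PySem.Set.mem_ofList] at this
    have hmax : ∀ v ∈ ds, ((PySem.Dict.counter ds).getD v 0) ≤ (PySem.Dict.counter ds).getD mA 0 := by
      intro v hv
      exact PySem.List.max?_isMax hmA v (by rw [hkeys, PySem.Set.mem_ofList]; exact hv)
    have hAv : (PySem.Dict.counter ds).getD mA 0 = (ds.count mA : Int) := PySem.Dict.getD_counter ds mA
    have h1 : (ds.count mA : Int) ≤ (PySem.List.sorted ds (fun d => d) false |>.foldl pvScanStep ((0:Int),(0:Int),none)).1 :=
      hBall mA hmAmem
    have h2 : (ds.count mB : Int) ≤ (ds.count mA : Int) := by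
      have := hmax mB hmB
      rwa [hAv, PySem.Dict.getD_counter ds mB] at this
    rw [hAv]
    omega
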